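-- pv_equiv track=rewrite | github.com/zulumonkeymetallic/bob | website/scripts/extract-skills.py | _consolidate_small_categories
-- ===== SOURCE A (Python) =====
-- from collections import Counter
--
-- MIN_CATEGORY_SIZE = 4
--
-- def _consolidate_small_categories(skills: list) -> list:
--     for s in skills:
--         if s["category"] in ("uncategorized", ""):
--             s["category"] = "other"
--             s["categoryLabel"] = "Other"
--
--     counts = Counter(s["category"] for s in skills)
--     small_cats = {cat for cat, n in counts.items() if n < MIN_CATEGORY_SIZE}
--
--     for s in skills:
--         if s["category"] in small_cats:
--             s["category"] = "other"
--             s["categoryLabel"] = "Other"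
--
--     return skills
-- ===== SOURCE B (Python) =====
-- MIN_CATEGORY_SIZE = 4
--
-- def _consolidate_small_categories(skills: list) -> list:
--     for s in skills:
--         if s["category"] in ("uncategorized", ""):
--             s["category"] = "other"
--             s["categoryLabel"] = "Other"
--
--     # Sort the skill indices by (normalized) category; equal categories are
--     # then contiguous runs, and a run shorter than MIN_CATEGORY_SIZE is
--     # exactly a small category, so relabel the members of such runs.
--     order = sorted(range(len(skills)), key=lambda i: skills[i]["category"])
--     i = 0
--     while i < len(order):
--         j = i
--         cat = skills[order[i]]["category"]
--         while j < len(order) and skills[order[j]]["category"] == cat: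
--             j += 1
--         if j - i < MIN_CATEGORY_SIZE:
--             for k in range(i, j):
--                 skills[order[k]]["category"] = "other"
--                 skills[order[k]]["categoryLabel"] = "Other"
--         i = j
--     return skills
-- ===== Notes on version B (the rewrite author's own statement) =====
-- stated objective: alternative
-- what changed: Replaces A's hash-counting (Counter + small-category set + membership-filtered rescan of all skills) by sort-then-scan: the skill indices are sorted by normalized category and the sorted order is scanned once, relabelling every contiguous run shorter than MIN_CATEGORY_SIZE; correctness rests on equal categories being contiguous after sorting, so a run's length is the category's count.
import Mathlib
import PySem

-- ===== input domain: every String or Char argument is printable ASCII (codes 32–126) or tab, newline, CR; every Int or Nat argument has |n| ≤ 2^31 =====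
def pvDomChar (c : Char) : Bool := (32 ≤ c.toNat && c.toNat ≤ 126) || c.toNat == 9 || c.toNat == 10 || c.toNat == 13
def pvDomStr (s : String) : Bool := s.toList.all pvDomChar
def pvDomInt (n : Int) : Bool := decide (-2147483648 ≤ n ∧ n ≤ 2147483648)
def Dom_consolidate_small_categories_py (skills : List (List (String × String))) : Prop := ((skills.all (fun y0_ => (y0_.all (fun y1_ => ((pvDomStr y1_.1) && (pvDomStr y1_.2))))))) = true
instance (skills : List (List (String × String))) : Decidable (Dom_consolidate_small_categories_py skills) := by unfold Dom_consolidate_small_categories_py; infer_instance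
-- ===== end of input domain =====

-- B replaces A's Counter + small-category set + membership rescan by sort-then-scan:
-- skill indices sorted by normalized category, then one scan over the contiguous
-- equal-category runs, relabelling runs shorter than 4 (objective: alternative).
-- Both Pythons mutate the skill dicts in place; the theorems are about the
-- returned value (identical lists in both cases).

-- ===== PORT A =====
-- s["category"]  (Pre_ guarantees the key is present, so getD "" is exact)
def pvCat (s : List (String × String)) : String :=
  ((PySem.Dict.mk s).get? "category").getD ""

-- s["category"] = "other"; s["categoryLabel"] = "Other"
def pvUpd (s : List (String × String)) : List (String × String) :=
  (((PySem.Dict.mk s).insert "category" "other").insert "categoryLabel" "Other").items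

-- the first (normalization) loop, which A and B share verbatim
def pvNorm (s : List (String × String)) : List (String × String) :=
  if pvCat s == "uncategorized" || pvCat s == "" then pvUpd s else s

def consolidate_small_categories_py (skills : List (List (String × String))) : List (List (String × String)) :=
  let step1 := skills.map pvNorm
  let counts := PySem.Dict.counter (step1.map pvCat)
  let small : PySem.Set String :=
    PySem.Set.ofList ((counts.items.filter (fun p => p.2 < 4)).map (·.1))
  step1.map (fun s => if small.contains (pvCat s) then pvUpd s else s)

-- ===== PORT B =====
-- skills[i]["category"], read through the normalized snapshot: B's scan only ever
-- reads positions it has not yet relabelled, so the snapshot read is exact.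
def pvCatAt (l : List (List (String × String))) (i : Nat) : String :=
  pvCat (l.getD i [])

-- the outer while loop: each step consumes one contiguous run of equal category
-- (the inner 'while … == cat: j += 1' is the takeWhile; advancing i to j is the
-- dropWhile) and records it
def pvRuns (cat : Nat → String) : List Nat → List (List Nat)
  | [] => []
  | i :: rest =>
      (i :: rest.takeWhile (fun j => cat j == cat i)) ::
        pvRuns cat (rest.dropWhile (fun j => cat j == cat i))
  termination_by l => l.length
  decreasing_by
    simpa using Nat.lt_succ_of_le (List.Sublist.length_le (List.dropWhile_sublist _))

def consolidate_small_categories_py_alt (skills : List (List (String × String))) : List (List (String × String)) :=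
  let step1 := skills.map pvNorm
  let order := PySem.List.sorted (List.range step1.length) (pvCatAt step1) false
  (pvRuns (pvCatAt step1) order).foldl
    (fun arr grp =>
      if grp.length < 4 then grp.foldl (fun a k => a.modify k pvUpd) arr else arr)
    step1

-- ===== PRECONDITION & SPEC =====
-- Pre_ excludes skills without a "category" key (Python raises KeyError there) and
-- association lists with duplicate keys, which do not represent a Python dict.
def Pre_consolidate_small_categories_py (skills : List (List (String × String))) : Prop :=
  ∀ s ∈ skills, (PySem.Dict.mk s).contains "category" = true ∧ (s.map Prod.fst).Nodup
instance (skills : List (List (String × String))) : Decidable (Pre_consolidate_small_categories_py skills) := by unfold Pre_consolidate_small_categories_py; infer_instance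

def pvWitness_consolidate_small_categories_py : (List (List (String × String))) :=
  [[("category", "uncategorized")], [("category", "python"), ("level", "1")]]

def Spec_consolidate_small_categories_py (skills : List (List (String × String))) (out : List (List (String × String))) : Prop := out = consolidate_small_categories_py_alt skills
instance (skills : List (List (String × String))) (out : List (List (String × String))) : Decidable (Spec_consolidate_small_categories_py skills out) := by unfold Spec_consolidate_small_categories_py; infer_instance

-- ===== CLAIM (what is proved, stated in full; the proofs are below) =====
def Claim_equal_consolidate_small_categories_py : Prop := ∀ (skills : List (List (String × String))), Dom_consolidate_small_categories_py skills → Pre_consolidate_small_categories_py skills → Spec_consolidate_small_categories_py skills (consolidate_small_categories_py skills)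

-- ===== LEMMAS AND PROOFS =====

-- the positions holding category c (what one relabelling run must touch)
def pvIdxs (l : List (List (String × String))) (c : String) : List Nat :=
  (List.range l.length).filter (fun j => pvCatAt l j == c)

lemma pvCatAt_lt (l : List (List (String × String))) (j : Nat) (h : j < l.length) :
    pvCatAt l j = pvCat l[j] := by
  simp [pvCatAt, List.getD_eq_getElem?_getD, List.getElem?_eq_getElem h]

lemma mem_pvIdxs (l : List (List (String × String))) (c : String) (j : Nat) :
    j ∈ pvIdxs l c ↔ ∃ h : j < l.length, pvCat l[j] = c := by
  simp only [pvIdxs, List.mem_filter, List.mem_range, beq_iff_eq]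
  constructor
  · rintro ⟨h, hc⟩; exact ⟨h, (pvCatAt_lt l j h) ▸ hc⟩
  · rintro ⟨h, hc⟩; exact ⟨h, (pvCatAt_lt l j h).symm ▸ hc⟩

lemma nodup_pvIdxs (l : List (List (String × String))) (c : String) :
    (pvIdxs l c).Nodup :=
  List.Nodup.filter _ (List.nodup_range)

lemma length_pvIdxs (l : List (List (String × String))) (c : String) :
    (pvIdxs l c).length = (l.map pvCat).count c := by
  simp only [pvIdxs, ← List.countP_eq_length_filter, List.count_eq_countP, List.countP_map]
  rw [List.range_eq_range']
  induction l with
  | nil => simp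
  | cons x xs ih =>
    rw [List.length_cons, List.range'_succ, List.countP_cons, List.countP_cons]
    have h0 : pvCatAt (x :: xs) 0 = pvCat x := pvCatAt_lt _ 0 (by simp)
    have hsh : ∀ k, List.countP (fun j => pvCatAt (x :: xs) j == c) (List.range' 1 k) =
        List.countP (fun j => pvCatAt xs j == c) (List.range' 0 k) := by
      intro k
      induction k with
      | zero => simp
      | succ m ihm =>
        rw [List.range'_1_concat, List.range'_1_concat, List.countP_append, List.countP_append, ihm]
        have : pvCatAt (x :: xs) (1 + m) = pvCatAt xs (0 + m) := by
          simp [pvCatAt, Nat.add_comm 1 m]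
        simp [this]
    rw [hsh, ih]
    simp [Function.comp_def, h0, Nat.add_comm]

lemma pvFoldModify_length {α : Type} (f : α → α) (idxs : List Nat) (arr : List α) :
    (idxs.foldl (fun a i => a.modify i f) arr).length = arr.length := by
  induction idxs generalizing arr with
  | nil => rfl
  | cons i rest ih => simp [ih, List.length_modify]

lemma pvFoldModify_getElem? {α : Type} (f : α → α) (idxs : List Nat) (h : idxs.Nodup)
    (arr : List α) (j : Nat) :
    (idxs.foldl (fun a i => a.modify i f) arr)[j]? =
      if j ∈ idxs then arr[j]?.map f else arr[j]? := by
  induction idxs generalizing arr with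
  | nil => simp
  | cons i rest ih =>
    simp only [List.nodup_cons] at h
    rw [List.foldl_cons, ih h.2]
    by_cases hj : j ∈ rest
    · have hne : i ≠ j := fun e => h.1 (e ▸ hj)
      simp [hj, hne, List.mem_cons]
    · by_cases hij : j = i
      · subst hij
        simp [hj]
      · simp [hj, hij, Ne.symm hij]

-- in a key-sorted list the elements equal to the head's key form a prefix
lemma pvTakeDropFilter (cat : Nat → String) (c : String) (rest : List Nat)
    (hp : rest.Pairwise (fun a b => cat a ≤ cat b))
    (hge : ∀ b ∈ rest, c ≤ cat b) :
    rest.takeWhile (fun j => cat j == c) = rest.filter (fun j => cat j == c) ∧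
    rest.dropWhile (fun j => cat j == c) = rest.filter (fun j => !(cat j == c)) := by
  induction rest with
  | nil => simp
  | cons a t ih =>
    obtain ⟨hat, tp⟩ := List.pairwise_cons.1 hp
    by_cases ha : cat a = c
    · obtain ⟨h1, h2⟩ := ih tp (fun b hb => hge b (List.mem_cons_of_mem _ hb))
      constructor
      · simp [ha, h1]
      · simp [ha, h2]
    · have hlt : c < cat a := lt_of_le_of_ne (hge a (by simp)) (Ne.symm ha)
      have hall : ∀ b ∈ a :: t, ¬ (cat b = c) := by
        intro b hb e
        rcases List.mem_cons.1 hb with rfl | hbt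
        · exact ha e
        · exact absurd (e ▸ hat b hbt) (not_le_of_gt hlt)
      constructor
      · rw [List.takeWhile_cons, if_neg (by simp [ha]), List.filter_eq_nil_iff.2 (by
          intro b hb; simpa using hall b hb)]
      · rw [List.dropWhile_cons, if_neg (by simp [ha])]
        rw [List.filter_eq_self.2 (by intro b hb; simpa using hall b hb)]

-- second phase of B: folding the relabel step over the runs of a key-sorted,
-- duplicate-free, category-closed index list relabels exactly the positions whose
-- (normalized) category is small
lemma pvScatter (l : List (List (String × String))) :
    ∀ (ord : List Nat) (arr : List (List (String × String))),
    (∀ j ∈ ord, j < l.length) →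
    ord.Pairwise (fun a b => pvCatAt l a ≤ pvCatAt l b) →
    ord.Nodup →
    (∀ j, j < l.length → ∀ k ∈ ord, pvCatAt l k = pvCatAt l j → j ∈ ord) →
    arr.length = l.length →
    (∀ j, j < l.length → j ∈ ord → arr[j]? = l[j]?) →
    ∀ j,
    ((pvRuns (pvCatAt l) ord).foldl
        (fun arr grp => if grp.length < 4 then grp.foldl (fun a k => a.modify k pvUpd) arr else arr)
        arr)[j]? =
      if h : j < l.length then
        (if j ∈ ord ∧ (l.map pvCat).count (pvCat l[j]) < 4
          then some (pvUpd l[j]) else arr[j]?)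
      else none := by
  intro ord
  induction ord using pvRuns.induct (cat := pvCatAt l) with
  | case1 =>
    intro arr _ _ _ _ hlen _ j
    simp only [pvRuns, List.foldl_nil, List.not_mem_nil, false_and, if_false]
    by_cases h : j < l.length
    · simp [h]
    · simp [h, List.getElem?_eq_none (by omega : arr.length ≤ j)]
  | case2 i rest ih =>
    intro arr hlt hp hnd hcl hlen hagree j
    set c := pvCatAt l i with hc
    have hge : ∀ b ∈ rest, c ≤ pvCatAt l b := fun b hb =>
      (List.pairwise_cons.1 hp).1 b hb
    obtain ⟨htake, hdrop⟩ := pvTakeDropFilter (pvCatAt l) c rest (List.pairwise_cons.1 hp).2 hge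
    rw [pvRuns, List.foldl_cons, htake, hdrop]
    rw [hdrop] at ih
    set grp : List Nat := i :: rest.filter (fun j => pvCatAt l j == c) with hgrp
    set tail : List Nat := rest.filter (fun j => !(pvCatAt l j == c)) with htail
    have hmem_grp : ∀ k, k ∈ grp ↔ k ∈ i :: rest ∧ pvCatAt l k = c := by
      intro k
      simp only [hgrp, List.mem_cons, List.mem_filter, beq_iff_eq]
      constructor
      · rintro (rfl | ⟨hk, he⟩)
        · exact ⟨Or.inl rfl, rfl⟩
        · exact ⟨Or.inr hk, he⟩
      · rintro ⟨rfl | hk, he⟩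
        · exact Or.inl rfl
        · exact Or.inr ⟨hk, he⟩
    have hmem_tail : ∀ k, k ∈ tail ↔ k ∈ rest ∧ pvCatAt l k ≠ c := by
      intro k; simp [htail]
    have hnd_grp : grp.Nodup := by
      rw [hgrp, List.nodup_cons]
      refine ⟨fun hin => (List.nodup_cons.1 hnd).1 (List.mem_of_mem_filter hin),
        List.Nodup.filter _ (List.nodup_cons.1 hnd).2⟩
    -- grp has the same members as pvIdxs l c, hence its length is the count of c
    have hgrp_idxs : ∀ k, k ∈ grp ↔ k ∈ pvIdxs l c := by
      intro k
      rw [hmem_grp, mem_pvIdxs]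
      constructor
      · rintro ⟨hk, he⟩
        have hklt := hlt k hk
        exact ⟨hklt, (pvCatAt_lt l k hklt) ▸ he⟩
      · rintro ⟨hklt, he⟩
        have : pvCatAt l k = pvCatAt l i := by
          rw [pvCatAt_lt l k hklt, he]
        have hik : k ∈ i :: rest := hcl k hklt i (by simp) this.symm
        exact ⟨hik, by rw [pvCatAt_lt l k hklt, he]⟩
    have hlen_grp : grp.length = (l.map pvCat).count c := by
      rw [← length_pvIdxs]
      exact List.Perm.length_eq
        ((List.perm_ext_iff_of_nodup hnd_grp (nodup_pvIdxs l c)).2 hgrp_idxs)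
    set arr' := if grp.length < 4 then grp.foldl (fun a k => a.modify k pvUpd) arr else arr
      with harr'
    have hlen' : arr'.length = l.length := by
      rw [harr']; split
      · rw [pvFoldModify_length]; exact hlen
      · exact hlen
    have hget' : ∀ k, arr'[k]? =
        if grp.length < 4 ∧ k ∈ grp then arr[k]?.map pvUpd else arr[k]? := by
      intro k
      rw [harr']
      by_cases hsm : grp.length < 4
      · rw [if_pos hsm, pvFoldModify_getElem? _ _ hnd_grp]
        by_cases hk : k ∈ grp <;> simp [hk, hsm]
      · simp [hsm]
    -- hypotheses for the recursive call on tail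
    have hlt_t : ∀ j ∈ tail, j < l.length := fun j hj =>
      hlt j (List.mem_cons_of_mem _ ((hmem_tail j).1 hj).1)
    have hp_t : tail.Pairwise (fun a b => pvCatAt l a ≤ pvCatAt l b) :=
      List.Pairwise.sublist (List.Sublist.trans List.filter_sublist (List.sublist_cons_self i rest)) hp
    have hnd_t : tail.Nodup := List.Nodup.filter _ (List.nodup_cons.1 hnd).2
    have hcl_t : ∀ j, j < l.length → ∀ k ∈ tail, pvCatAt l k = pvCatAt l j → j ∈ tail := by
      intro j hj k hk he
      obtain ⟨hkr, hkne⟩ := (hmem_tail k).1 hk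
      have hjo : j ∈ i :: rest := hcl j hj k (List.mem_cons_of_mem _ hkr) he
      have hjne : pvCatAt l j ≠ c := he ▸ hkne
      rcases List.mem_cons.1 hjo with rfl | hjr
      · exact absurd rfl hjne
      · exact (hmem_tail j).2 ⟨hjr, hjne⟩
    have hagree_t : ∀ j, j < l.length → j ∈ tail → arr'[j]? = l[j]? := by
      intro j hj hjt
      obtain ⟨hjr, hjne⟩ := (hmem_tail j).1 hjt
      have hjng : j ∉ grp := fun hg => hjne ((hmem_grp j).1 hg).2
      rw [hget', if_neg (by tauto)]
      exact hagree j hj (List.mem_cons_of_mem _ hjr)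
    rw [ih arr' hlt_t hp_t hnd_t hcl_t hlen' hagree_t j]
    by_cases h : j < l.length
    · simp only [dif_pos h]
      have hcount_c : pvCatAt l j = c → (l.map pvCat).count (pvCat l[j]) = grp.length := by
        intro he
        rw [hlen_grp, ← he, pvCatAt_lt l j h]
      by_cases hjo : j ∈ i :: rest
      · by_cases hje : pvCatAt l j = c
        · -- j is in the head run
          have hjg : j ∈ grp := (hmem_grp j).2 ⟨hjo, hje⟩
          have hjnt : j ∉ tail := fun ht => ((hmem_tail j).1 ht).2 hje
          rw [if_neg (fun hcon => hjnt hcon.1)]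
          by_cases hsm : grp.length < 4
          · rw [hget', if_pos ⟨hsm, hjg⟩, hagree j h hjo, List.getElem?_eq_getElem h]
            rw [if_pos ⟨hjo, by rw [hcount_c hje]; exact hsm⟩]
            rfl
          · rw [hget', if_neg (by tauto), if_neg (fun hcon => hsm (by rw [← hcount_c hje]; exact hcon.2))]
        · -- j is in the tail
          have hjr : j ∈ rest := by
            rcases List.mem_cons.1 hjo with rfl | hr
            · exact absurd rfl hje
            · exact hr
          have hjt : j ∈ tail := (hmem_tail j).2 ⟨hjr, hje⟩
          have hjng : j ∉ grp := fun hg => hje ((hmem_grp j).1 hg).2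
          by_cases hcnt : (l.map pvCat).count (pvCat l[j]) < 4
          · rw [if_pos ⟨hjt, hcnt⟩, if_pos ⟨hjo, hcnt⟩]
          · rw [if_neg (fun hcon => hcnt hcon.2), if_neg (fun hcon => hcnt hcon.2)]
            rw [hget', if_neg (by tauto)]
      · -- j is not mentioned at all
        have hjng : j ∉ grp := fun hg => hjo ((hmem_grp j).1 hg).1
        have hjnt : j ∉ tail := fun ht => hjo (List.mem_cons_of_mem _ ((hmem_tail j).1 ht).1)
        rw [if_neg (fun hcon => hjnt hcon.1), if_neg (fun hcon => hjo hcon.1)]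
        rw [hget', if_neg (by tauto)]
    · simp only [dif_neg h]

-- A's small-category set, characterized by occurrence count
lemma pvSmall_contains (l : List (List (String × String))) (c : String) :
    (PySem.Set.ofList
        (((PySem.Dict.counter (l.map pvCat)).items.filter (fun p => p.2 < 4)).map (·.1))).contains c = true
      ↔ c ∈ l.map pvCat ∧ (l.map pvCat).count c < 4 := by
  rw [PySem.Set.contains_iff, PySem.Set.mem_ofList, PySem.Dict.items_counter,
    List.filter_map, List.map_map]
  rw [List.mem_map]
  constructor
  · rintro ⟨k, hk, hke⟩
    rw [List.mem_filter] at hk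
    obtain ⟨hk1, hk2⟩ := hk
    simp only [Function.comp_def] at hk2 hke
    subst hke
    refine ⟨(PySem.Set.mem_ofList _ _).1 hk1, ?_⟩
    simpa using hk2
  · rintro ⟨hc, hlt⟩
    refine ⟨c, ?_, rfl⟩
    rw [List.mem_filter]
    exact ⟨(PySem.Set.mem_ofList _ _).2 hc, by simpa [Function.comp_def] using hlt⟩

lemma pvMain (skills : List (List (String × String))) :
    consolidate_small_categories_py skills = consolidate_small_categories_py_alt skills := by
  simp only [consolidate_small_categories_py, consolidate_small_categories_py_alt]
  set l := skills.map pvNorm with hl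
  set ord := PySem.List.sorted (List.range l.length) (pvCatAt l) false with hord
  have hperm : ord.Perm (List.range l.length) := PySem.List.sorted_perm _ _ _
  have hmem_ord : ∀ j, j ∈ ord ↔ j < l.length := by
    intro j; rw [hperm.mem_iff, List.mem_range]
  have hres := pvScatter l ord l
    (fun j hj => (hmem_ord j).1 hj)
    (PySem.List.sorted_pairwise _ _)
    (hperm.nodup_iff.2 List.nodup_range)
    (fun j hj _ _ _ => (hmem_ord j).2 hj)
    rfl
    (fun _ _ _ => rfl)
  apply List.ext_getElem?
  intro j
  rw [hres j]
  by_cases h : j < l.length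
  · rw [List.getElem?_map, List.getElem?_eq_getElem h, dif_pos h]
    simp only [Option.map_some]
    have hmem : pvCat l[j] ∈ l.map pvCat := List.mem_map_of_mem (List.getElem_mem h)
    by_cases hsm : (l.map pvCat).count (pvCat l[j]) < 4
    · rw [if_pos ((pvSmall_contains l _).2 ⟨hmem, hsm⟩), if_pos ⟨(hmem_ord j).2 h, hsm⟩]
    · rw [if_neg (fun hcon => hsm ((pvSmall_contains l _).1 hcon).2),
        if_neg (fun hcon => hsm hcon.2)]
  · rw [dif_neg h, List.getElem?_map, List.getElem?_eq_none (by omega : l.length ≤ j)]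
    rfl

-- ===== VERDICT (by name: the statement is the Claim_ definition above) =====
theorem consolidate_small_categories_py_spec : Claim_equal_consolidate_small_categories_py := by
  intro skills _dom _pre
  unfold Spec_consolidate_small_categories_py
  exact pvMain skills
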